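-- pv_equiv track=rewrite | github.com/MrBrantCode/unitest_baseline | mut_generate/mist_train_cf/cf_39710/solution.py | allocate_memory_and_string
-- ===== SOURCE A (Python) =====
-- def allocate_memory_and_string(count: int, string_constant: str) -> int:
--     memory_addr = 0x123450  # Initial memory address
--     data_words = []
--
--     for _ in range(count):
--         data_words.append(memory_addr)
--         memory_addr += 2
--
--     string_addr = memory_addr  # Address for the ASCIIZ string constant
--
--     return string_addr
-- ===== SOURCE B (Python) =====
-- def allocate_memory_and_string(count: int, string_constant: str) -> int:
--     return 0x123450 + 2 * max(count, 0)
-- ===== Notes on version B (the rewrite author's own statement) =====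
-- stated objective: simpler
-- what changed: Replaces the loop that appends addresses to an unused list and increments by 2 per iteration with the closed-form expression 0x123450 + 2*max(count, 0).
import Mathlib
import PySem

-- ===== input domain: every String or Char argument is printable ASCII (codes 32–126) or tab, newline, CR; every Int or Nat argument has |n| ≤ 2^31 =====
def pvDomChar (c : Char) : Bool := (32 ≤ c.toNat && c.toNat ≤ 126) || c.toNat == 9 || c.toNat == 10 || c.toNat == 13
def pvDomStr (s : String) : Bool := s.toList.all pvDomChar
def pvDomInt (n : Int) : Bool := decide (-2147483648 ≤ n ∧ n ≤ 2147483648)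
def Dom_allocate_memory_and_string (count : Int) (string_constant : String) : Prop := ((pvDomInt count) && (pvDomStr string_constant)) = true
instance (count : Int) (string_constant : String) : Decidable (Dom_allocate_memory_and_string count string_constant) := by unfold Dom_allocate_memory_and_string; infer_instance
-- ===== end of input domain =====

-- ===== PORT A =====
-- B replaces A's loop (unused list + +2 per step) by the closed form 0x123450 + 2*max(count,0); return value only.
def allocate_memory_and_string (count : Int) (string_constant : String) : Int :=
  let memory_addr : Int := 0x123450
  let data_words : List Int := []
  let (data_words, memory_addr) :=
    (PySem.List.pyRange 0 count 1).foldl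
      (fun (st : List Int × Int) _ => (st.1 ++ [st.2], st.2 + 2)) (data_words, memory_addr)
  let string_addr := memory_addr
  string_addr

-- ===== PORT B =====
def allocate_memory_and_string_alt (count : Int) (string_constant : String) : Int :=
  0x123450 + 2 * max count 0

-- ===== PRECONDITION & SPEC =====
def Spec_allocate_memory_and_string (count : Int) (string_constant : String) (out : Int) : Prop := out = allocate_memory_and_string_alt count string_constant
instance (count : Int) (string_constant : String) (out : Int) : Decidable (Spec_allocate_memory_and_string count string_constant out) := by unfold Spec_allocate_memory_and_string; infer_instance

-- ===== CLAIM (what is proved, stated in full; the proofs are below) =====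
def Claim_equal_allocate_memory_and_string : Prop := ∀ (count : Int) (string_constant : String), Dom_allocate_memory_and_string count string_constant → Spec_allocate_memory_and_string count string_constant (allocate_memory_and_string count string_constant)

-- ===== LEMMAS AND PROOFS =====

-- ===== VERDICT (by name: the statement is the Claim_ definition above) =====
theorem pv_fold_addr (l : List Int) (ws : List Int) (a : Int) :
    (l.foldl (fun (st : List Int × Int) _ => (st.1 ++ [st.2], st.2 + 2)) (ws, a)).2
      = a + 2 * l.length := by
  induction l generalizing ws a with
  | nil => simp
  | cons x xs ih => simp [List.foldl, ih]; ring

theorem allocate_memory_and_string_spec : Claim_equal_allocate_memory_and_string := by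
  intro count string_constant _
  unfold Spec_allocate_memory_and_string allocate_memory_and_string allocate_memory_and_string_alt
  simp only [pv_fold_addr, PySem.List.length_pyRange_one]
  omega
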